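-- pv_equiv track=rewrite | github.com/shencode76/Near-Duplicate-Detection-Using-Bloom-Filters-and-LSH | a2/src/a2/dedup.py | find_candidate_pairs
-- ===== SOURCE A (Python) =====
-- def find_candidate_pairs(band_hashes):
--     """
--     Finds candidate document pairs based on LSH hash buckets.
--     :param band_hashes: List of LSH hashes for documents.
--     :return: Set of candidate document pairs.
--     """
--     buckets = {}
--     candidate_pairs = set()
--
--     for doc_id, hash_list in enumerate(band_hashes):
--         for band_id, band_hash in enumerate(hash_list):
--             if (band_id, band_hash) not in buckets:
--                 buckets[(band_id, band_hash)] = []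
--             for candidate_doc_id in buckets[(band_id, band_hash)]:
--                 candidate_pairs.add((min(doc_id, candidate_doc_id), max(doc_id, candidate_doc_id)))
--             buckets[(band_id, band_hash)].append(doc_id)
--
--     return candidate_pairs
-- ===== SOURCE B (Python) =====
-- def find_candidate_pairs(band_hashes):
--     """Two-phase: build all buckets first, then emit pairs from each bucket's ascending member list."""
--     buckets = {}
--     for doc_id, hash_list in enumerate(band_hashes):
--         for band_id, band_hash in enumerate(hash_list):
--             buckets.setdefault((band_id, band_hash), []).append(doc_id)
--     candidate_pairs = set()
--     for doc_id, hash_list in enumerate(band_hashes):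
--         for band_id, band_hash in enumerate(hash_list):
--             for other in buckets[(band_id, band_hash)]:
--                 if other >= doc_id:
--                     break
--                 candidate_pairs.add((other, doc_id))
--     return candidate_pairs
-- ===== Notes on version B (the rewrite author's own statement) =====
-- stated objective: alternative
-- what changed: A interleaves bucket construction with pair emission (pairing each new doc against the current bucket contents with min/max); B first builds all buckets in one pass, then a second pass emits, for each doc and band, the pairs with the earlier members of the already-complete bucket, stopping at the first member >= doc_id since bucket lists are ascending.
import Mathlib
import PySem

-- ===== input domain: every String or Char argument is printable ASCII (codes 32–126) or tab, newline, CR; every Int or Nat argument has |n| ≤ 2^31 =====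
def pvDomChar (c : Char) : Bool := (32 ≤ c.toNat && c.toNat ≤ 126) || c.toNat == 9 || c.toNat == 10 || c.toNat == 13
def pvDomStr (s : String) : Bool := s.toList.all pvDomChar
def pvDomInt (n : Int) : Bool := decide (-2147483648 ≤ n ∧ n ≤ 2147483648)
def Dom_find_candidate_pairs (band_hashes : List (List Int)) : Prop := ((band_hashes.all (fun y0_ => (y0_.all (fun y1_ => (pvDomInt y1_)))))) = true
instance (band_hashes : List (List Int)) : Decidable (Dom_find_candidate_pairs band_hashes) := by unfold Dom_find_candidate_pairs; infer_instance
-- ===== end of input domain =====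

-- B replaces A's interleaved build-and-emit with two passes: build all buckets first, then emit each doc's
-- pairs from the ascending bucket lists (alternative decomposition, same cost; return value proved equal).

-- ===== PORT A =====
def find_candidate_pairs (band_hashes : List (List Int)) : List (Int × Int) :=
  let res := (PySem.List.enumerate band_hashes 0).foldl
    (fun (st : PySem.Dict (Int × Int) (List Int) × PySem.Set (Int × Int)) r =>
      (PySem.List.enumerate r.2 0).foldl
        (fun st q =>
          -- if (band_id, band_hash) not in buckets: buckets[(band_id, band_hash)] = []
          let buckets := if st.1.contains q then st.1 else st.1.insert q ([] : List Int)
          let members := buckets.getD q []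
          -- for candidate_doc_id in buckets[...]: candidate_pairs.add((min ..., max ...))
          let pairs := members.foldl
            (fun s c => PySem.Set.add s (min r.1 c, max r.1 c)) st.2
          -- buckets[(band_id, band_hash)].append(doc_id)
          (buckets.insert q (members ++ [r.1]), pairs)) st)
    (PySem.Dict.empty, PySem.Set.empty)
  res.2

-- ===== PORT B =====
-- hand port of `for other in members: if other >= doc_id: break; candidate_pairs.add((other, doc_id))`
-- (exact: the loop consumes members in order and stops at the first member ≥ doc_id)
def pyBreakPairs (members : List Int) (doc_id : Int) (s : PySem.Set (Int × Int)) : PySem.Set (Int × Int) :=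
  match members with
  | [] => s
  | other :: rest =>
    if doc_id ≤ other then s
    else pyBreakPairs rest doc_id (PySem.Set.add s (other, doc_id))

def find_candidate_pairs_alt (band_hashes : List (List Int)) : List (Int × Int) :=
  -- phase 1: buckets.setdefault((band_id, band_hash), []).append(doc_id)
  let buckets := (PySem.List.enumerate band_hashes 0).foldl
    (fun (d : PySem.Dict (Int × Int) (List Int)) r =>
      (PySem.List.enumerate r.2 0).foldl
        (fun d q => d.modify q [] (fun l => l ++ [r.1])) d)
    PySem.Dict.empty
  -- phase 2: emit pairs with earlier members of the complete bucket
  (PySem.List.enumerate band_hashes 0).foldl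
    (fun s r =>
      (PySem.List.enumerate r.2 0).foldl
        (fun s q => pyBreakPairs (buckets.getD q []) r.1 s) s)
    PySem.Set.empty

-- ===== PRECONDITION & SPEC =====
def Spec_find_candidate_pairs (band_hashes : List (List Int)) (out : List (Int × Int)) : Prop := out = find_candidate_pairs_alt band_hashes
instance (band_hashes : List (List Int)) (out : List (Int × Int)) : Decidable (Spec_find_candidate_pairs band_hashes out) := by unfold Spec_find_candidate_pairs; infer_instance

-- ===== CLAIM (what is proved, stated in full; the proofs are below) =====
def Claim_equal_find_candidate_pairs : Prop := ∀ (band_hashes : List (List Int)), Dom_find_candidate_pairs band_hashes → Spec_find_candidate_pairs band_hashes (find_candidate_pairs band_hashes)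

-- ===== LEMMAS AND PROOFS =====

-- the (key, doc_id) entries both nested loops traverse, flattened in traversal order
def pvBlock (r : Int × List Int) : List ((Int × Int) × Int) :=
  (PySem.List.enumerate r.2 0).map (fun q => (q, r.1))

def pvFlat (band_hashes : List (List Int)) : List ((Int × Int) × Int) :=
  (PySem.List.enumerate band_hashes 0).flatMap pvBlock

-- traversal order: doc ids strictly increase, and entries of one doc carry distinct keys
def pvRel (p q : (Int × Int) × Int) : Prop := p.2 < q.2 ∨ (p.2 = q.2 ∧ p.1 ≠ q.1)

-- A's inner-loop body on the flattened entry list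
def pvStepA (st : PySem.Dict (Int × Int) (List Int) × PySem.Set (Int × Int))
    (p : (Int × Int) × Int) : PySem.Dict (Int × Int) (List Int) × PySem.Set (Int × Int) :=
  let buckets := if st.1.contains p.1 then st.1 else st.1.insert p.1 ([] : List Int)
  let members := buckets.getD p.1 []
  (buckets.insert p.1 (members ++ [p.2]),
   members.foldl (fun s c => PySem.Set.add s (min p.2 c, max p.2 c)) st.2)

-- B's phase-1 dict built from a flattened entry list
def pvDictOf (L : List ((Int × Int) × Int)) : PySem.Dict (Int × Int) (List Int) :=
  L.foldl (fun d p => d.modify p.1 [] (fun l => l ++ [p.2])) PySem.Dict.empty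

lemma pvFoldFlat {σ : Type} (l : List (Int × List Int)) (f : σ → (Int × Int) → Int → σ) (init : σ) :
    l.foldl (fun st r => (PySem.List.enumerate r.2 0).foldl (fun st q => f st q r.1) st) init
      = (l.flatMap pvBlock).foldl (fun st p => f st p.1 p.2) init := by
  induction l generalizing init with
  | nil => rfl
  | cons r t ih => simp [pvBlock, List.foldl_append, List.foldl_map, ih]

lemma portA_eq_flat (bh : List (List Int)) :
    find_candidate_pairs bh = ((pvFlat bh).foldl pvStepA (PySem.Dict.empty, PySem.Set.empty)).2 :=
  congrArg Prod.snd
    (pvFoldFlat (PySem.List.enumerate bh 0) (fun st q j => pvStepA st (q, j))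
      (PySem.Dict.empty, PySem.Set.empty))

lemma portB_eq_flat (bh : List (List Int)) :
    find_candidate_pairs_alt bh
      = (pvFlat bh).foldl
          (fun s p => pyBreakPairs ((pvDictOf (pvFlat bh)).getD p.1 []) p.2 s) PySem.Set.empty := by
  have hd := pvFoldFlat (PySem.List.enumerate bh 0)
      (fun (d : PySem.Dict (Int × Int) (List Int)) q j => d.modify q [] (fun l => l ++ [j]))
      PySem.Dict.empty
  show ((PySem.List.enumerate bh 0).foldl _ PySem.Set.empty) = _
  rw [show ((PySem.List.enumerate bh 0).foldl
        (fun (d : PySem.Dict (Int × Int) (List Int)) r =>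
          (PySem.List.enumerate r.2 0).foldl (fun d q => d.modify q [] (fun l => l ++ [r.1])) d)
        PySem.Dict.empty) = pvDictOf (pvFlat bh) from hd]
  exact pvFoldFlat (PySem.List.enumerate bh 0)
    (fun s q j => pyBreakPairs ((pvDictOf (pvFlat bh)).getD q []) j s) PySem.Set.empty

lemma pvDictOf_getD (L : List ((Int × Int) × Int)) (k : Int × Int) :
    (pvDictOf L).getD k [] = (L.filter (fun p => p.1 == k)).map (·.2) := by
  unfold pvDictOf
  rw [PySem.Dict.getD_foldl_modify_append]
  simp [PySem.Dict.getD_empty]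

lemma pvInsertInsertSelf (d : PySem.Dict (Int × Int) (List Int)) (k : Int × Int) (v w : List Int) :
    (d.insert k v).insert k w = d.insert k w := by
  apply PySem.Dict.ext
  have h1 : (d.insert k v).contains k = true := PySem.Dict.contains_insert_self d k v
  rw [PySem.Dict.items_insert_of_contains _ w h1]
  by_cases hc : d.contains k = true
  · rw [PySem.Dict.items_insert_of_contains _ v hc, PySem.Dict.items_insert_of_contains _ w hc,
        List.map_map]
    apply List.map_congr_left
    intro p _
    by_cases hp : p.1 = k <;> simp [hp]
  · have hc' : d.contains k = false := by simpa using hc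
    have hall : ∀ p ∈ d.items, (p.1 == k) = false := by
      intro p hp
      rcases Bool.eq_false_or_eq_true (p.1 == k) with h | h
      · exfalso
        have hct : d.contains k = true := by
          simp only [PySem.Dict.contains, List.any_eq_true]
          exact ⟨p, hp, h⟩
        rw [hct] at hc'
        cases hc'
      · exact h
    rw [PySem.Dict.items_insert_of_not_contains _ v hc',
        PySem.Dict.items_insert_of_not_contains _ w hc', List.map_append]
    have hmap : d.items.map (fun p => if (p.1 == k) = true then (k, w) else p) = d.items := by
      conv_rhs => rw [← List.map_id d.items]
      apply List.map_congr_left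
      intro p hp
      simp [hall p hp]
    rw [hmap]
    simp

lemma pvStepA_fst (d : PySem.Dict (Int × Int) (List Int)) (s : PySem.Set (Int × Int))
    (p : (Int × Int) × Int) :
    (pvStepA (d, s) p).1 = d.modify p.1 [] (fun l => l ++ [p.2]) := by
  unfold pvStepA PySem.Dict.modify
  by_cases hc : d.contains p.1 = true
  · simp [hc]
  · have hc' : d.contains p.1 = false := by simpa using hc
    simp [hc', PySem.Dict.getD_insert_self, PySem.Dict.getD_of_not_contains d _ hc',
      pvInsertInsertSelf]

lemma pvStepA_snd (d : PySem.Dict (Int × Int) (List Int)) (s : PySem.Set (Int × Int))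
    (p : (Int × Int) × Int) :
    (pvStepA (d, s) p).2
      = (d.getD p.1 []).foldl (fun s c => PySem.Set.add s (min p.2 c, max p.2 c)) s := by
  unfold pvStepA
  by_cases hc : d.contains p.1 = true
  · simp [hc]
  · have hc' : d.contains p.1 = false := by simpa using hc
    simp [hc', PySem.Dict.getD_insert_self, PySem.Dict.getD_of_not_contains d _ hc']

lemma pyBreakPairs_eq (ms rest : List Int) (j : Int) (s : PySem.Set (Int × Int))
    (hms : ∀ c ∈ ms, c < j) (hrest : ∀ v ∈ rest, j ≤ v) :
    pyBreakPairs (ms ++ rest) j s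
      = ms.foldl (fun s c => PySem.Set.add s (min j c, max j c)) s := by
  revert hms
  induction ms generalizing s with
  | nil =>
    intro _
    cases rest with
    | nil => rfl
    | cons v t => simp [pyBreakPairs, hrest v List.mem_cons_self]
  | cons c t ih =>
    intro hms
    have hcj : c < j := hms c List.mem_cons_self
    rw [List.cons_append]
    simp only [pyBreakPairs, List.foldl_cons]
    rw [if_neg (not_le.mpr hcj), min_eq_right hcj.le, max_eq_left hcj.le]
    exact ih _ (fun c' hc' => hms c' (List.mem_cons_of_mem _ hc'))

lemma pvMain (L : List ((Int × Int) × Int)) (pre : List ((Int × Int) × Int))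
    (s : PySem.Set (Int × Int)) (hp : (pre ++ L).Pairwise pvRel) :
    L.foldl pvStepA (pvDictOf pre, s)
      = (pvDictOf (pre ++ L),
         L.foldl (fun s p => pyBreakPairs ((pvDictOf (pre ++ L)).getD p.1 []) p.2 s) s) := by
  revert hp
  induction L generalizing pre s with
  | nil => intro _; simp
  | cons p t ih =>
    intro hp
    have hsplit := List.pairwise_append.mp hp
    have hcross : ∀ a ∈ pre, ∀ b ∈ p :: t, pvRel a b := hsplit.2.2
    have hpt : (p :: t).Pairwise pvRel := hsplit.2.1
    have hpq : ∀ q ∈ t, pvRel p q := (List.pairwise_cons.mp hpt).1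
    have hms : ∀ c ∈ (pre.filter (fun q => q.1 == p.1)).map (fun q => q.2), c < p.2 := by
      intro c hc
      rcases List.mem_map.mp hc with ⟨q, hq, rfl⟩
      have hqp := List.mem_filter.mp hq
      have hkey : q.1 = p.1 := by simpa using hqp.2
      rcases hcross q hqp.1 p List.mem_cons_self with h | h
      · exact h
      · exact absurd hkey h.2
    have hrest : ∀ v ∈ p.2 :: ((t.filter (fun q => q.1 == p.1)).map (fun q => q.2)), p.2 ≤ v := by
      intro v hv
      rcases List.mem_cons.mp hv with rfl | hv
      · exact le_refl _
      · rcases List.mem_map.mp hv with ⟨q, hq, rfl⟩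
        have hqf := List.mem_filter.mp hq
        have hkey : q.1 = p.1 := by simpa using hqf.2
        rcases hpq q hqf.1 with h | h
        · exact h.le
        · exact absurd hkey.symm h.2
    have hfull : (pvDictOf (pre ++ p :: t)).getD p.1 []
        = ((pre.filter (fun q => q.1 == p.1)).map (fun q => q.2))
          ++ (p.2 :: ((t.filter (fun q => q.1 == p.1)).map (fun q => q.2))) := by
      rw [pvDictOf_getD, List.filter_append, List.map_append, List.filter_cons]
      simp
    have h1 : (pvStepA (pvDictOf pre, s) p).1 = pvDictOf (pre ++ [p]) := by
      rw [pvStepA_fst]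
      unfold pvDictOf
      rw [List.foldl_append]
      rfl
    have h2 : (pvStepA (pvDictOf pre, s) p).2
        = pyBreakPairs ((pvDictOf (pre ++ p :: t)).getD p.1 []) p.2 s := by
      rw [pvStepA_snd, pvDictOf_getD, hfull, pyBreakPairs_eq _ _ _ _ hms hrest]
    have hstep : pvStepA (pvDictOf pre, s) p
        = (pvDictOf (pre ++ [p]),
           pyBreakPairs ((pvDictOf (pre ++ p :: t)).getD p.1 []) p.2 s) := by
      calc pvStepA (pvDictOf pre, s) p
          = ((pvStepA (pvDictOf pre, s) p).1, (pvStepA (pvDictOf pre, s) p).2) := rfl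
        _ = _ := by rw [h1, h2]
    rw [List.foldl_cons, hstep]
    have hp' : ((pre ++ [p]) ++ t).Pairwise pvRel := by
      rw [List.append_assoc, List.singleton_append]
      exact hp
    rw [ih (pre ++ [p]) _ hp']
    simp only [List.append_assoc, List.singleton_append]
    rw [List.foldl_cons]

lemma pvBlock_pairwise (r : Int × List Int) : (pvBlock r).Pairwise pvRel := by
  refine List.Pairwise.map _ (fun a b hab => ?_) (PySem.List.pairwise_lt_enumerate r.2 0)
  refine Or.inr ⟨rfl, fun h => ?_⟩
  have hab' : a = b := h
  rw [hab'] at hab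
  exact lt_irrefl _ hab

lemma pvFlat_pairwise_aux (l : List (Int × List Int))
    (h : l.Pairwise (fun a b => a.1 < b.1)) :
    (l.flatMap pvBlock).Pairwise pvRel := by
  induction l with
  | nil => simp
  | cons r t ih =>
    rw [List.flatMap_cons, List.pairwise_append]
    obtain ⟨hr, ht⟩ := List.pairwise_cons.mp h
    refine ⟨pvBlock_pairwise r, ih ht, fun a ha b hb => ?_⟩
    have ha2 : a.2 = r.1 := by
      rcases List.mem_map.mp ha with ⟨q, _, rfl⟩; rfl
    rcases List.mem_flatMap.mp hb with ⟨r', hr', hb'⟩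
    have hb2 : b.2 = r'.1 := by
      rcases List.mem_map.mp hb' with ⟨q, _, rfl⟩; rfl
    exact Or.inl (by rw [ha2, hb2]; exact hr r' hr')

lemma pvFlat_pairwise (bh : List (List Int)) : (pvFlat bh).Pairwise pvRel :=
  pvFlat_pairwise_aux _ (PySem.List.pairwise_lt_enumerate bh 0)

-- ===== VERDICT (by name: the statement is the Claim_ definition above) =====
theorem find_candidate_pairs_spec : Claim_equal_find_candidate_pairs := by
  intro bh _
  unfold Spec_find_candidate_pairs
  rw [portA_eq_flat, portB_eq_flat]
  have h := pvMain (pvFlat bh) [] PySem.Set.empty (by simpa using pvFlat_pairwise bh)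
  simp only [List.nil_append] at h
  rw [show pvDictOf ([] : List ((Int × Int) × Int)) = PySem.Dict.empty from rfl] at h
  rw [h]
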